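-- pv_equiv track=rewrite | github.com/ruben-sa-brito/codewars | python/7 kyu/wheres_waldo.py | find_waldo
-- ===== SOURCE A (Python) =====
-- def find_waldo(crowd):
--     str1 = ''.join(crowd)
--     list1 = list()
--
--     x = 0
--     y = 0
--     for char in str1:
--         list1.append(char)
--
--     for str in crowd:
--         y = 0
--         for char in str:
--             if list1.count(char) == 1:
--                 return [x , y]
--             y +=1
--         x += 1
-- ===== SOURCE B (Python) =====
-- def find_waldo(crowd):
--     # One pass: map each char to (first position, occurrence count);
--     # then pick the minimal position among chars occurring exactly once.
--     info = {}
--     for x, row in enumerate(crowd):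
--         for y, ch in enumerate(row):
--             got = info.get(ch)
--             if got is not None:
--                 info[ch] = (got[0], got[1] + 1)
--             else:
--                 info[ch] = ((x, y), 1)
--     cands = [pos for pos, cnt in info.values() if cnt == 1]
--     if not cands:
--         return None
--     x, y = min(cands)
--     return [x, y]
-- ===== Notes on version B (the rewrite author's own statement) =====
-- stated objective: faster
-- what changed: A repeatedly re-counts each character with list.count inside the scan (quadratic); B builds in one pass a dict from char to (first position, count) and then returns the minimum (row, col) among the unique characters, with no re-scan of the grid. Pre_ excludes grids with no globally-unique character, on which A returns None rather than a list of ints.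
-- outside the precondition, e.g. on find_waldo(['ab', 'ab']): A returns None, B returns None
import Mathlib
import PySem

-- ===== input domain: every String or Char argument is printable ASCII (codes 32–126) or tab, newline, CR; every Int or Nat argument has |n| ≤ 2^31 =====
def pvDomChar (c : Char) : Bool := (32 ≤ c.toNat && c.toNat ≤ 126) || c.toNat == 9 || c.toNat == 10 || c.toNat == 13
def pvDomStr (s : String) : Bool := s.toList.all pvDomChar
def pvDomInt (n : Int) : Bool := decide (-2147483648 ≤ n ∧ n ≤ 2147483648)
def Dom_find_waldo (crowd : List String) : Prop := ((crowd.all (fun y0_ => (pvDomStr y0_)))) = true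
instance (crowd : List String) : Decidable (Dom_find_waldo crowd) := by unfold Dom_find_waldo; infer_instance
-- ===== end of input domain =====

-- B replaces A's repeated list.count re-scans by a one-pass char -> (first position, count) index
-- followed by a minimum over the unique characters' positions (measured faster in a timing run).

-- ===== PORT A =====
-- inner 'for char in str' loop of A (the early return becomes Option)
def findA_inner (list1 : List Char) (row : List Char) (x y : Int) : Option (List Int) :=
  match row with
  | [] => none
  | c :: rest => if list1.count c = 1 then some [x, y] else findA_inner list1 rest x (y + 1)

-- outer 'for str in crowd' loop of A
def findA_outer (list1 : List Char) (rows : List String) (x : Int) : Option (List Int) :=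
  match rows with
  | [] => none
  | s :: rest =>
    match findA_inner list1 s.toList x 0 with
    | some r => some r
    | none => findA_outer list1 rest (x + 1)

def find_waldo (crowd : List String) : List Int :=
  let str1 := PySem.Str.join "" crowd
  let list1 := str1.toList.foldl (fun acc ch => acc ++ [ch]) ([] : List Char)
  -- Python falls through returning None when no unique char exists (excluded by Pre_); [] stands in for the List Int type
  (findA_outer list1 crowd 0).getD []

-- ===== PORT B =====
def find_waldo_alt (crowd : List String) : List Int :=
  let info := (PySem.List.enumerate crowd 0).foldl
    (fun d xr => (PySem.List.enumerate xr.2.toList 0).foldl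
      (fun d yc =>
        match d.get? yc.2 with
        | some pc => d.insert yc.2 (pc.1, pc.2 + 1)
        | none => d.insert yc.2 ((xr.1, yc.1), (1 : Int))) d)
    (PySem.Dict.empty : PySem.Dict Char ((Int × Int) × Int))
  let cands := (info.values.filter (fun pc => pc.2 == 1)).map (·.1)
  match PySem.List.min2? cands (fun p => p.1) (fun p => p.2) with
  | some p => [p.1, p.2]
  | none => []  -- Python returns None here (excluded by Pre_)

-- ===== PRECONDITION & SPEC =====
-- Pre_ excludes exactly the grids containing no globally-unique character: there Python A returns
-- None, which is not a value of the declared list-of-int result type (B also returns None there).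
def Pre_find_waldo (crowd : List String) : Prop :=
  (let cs := (crowd.map String.toList).flatten
   cs.any (fun c => cs.count c == 1)) = true
instance (crowd : List String) : Decidable (Pre_find_waldo crowd) := by unfold Pre_find_waldo; infer_instance
def pvWitness_find_waldo : List String := ["ab", "cb"]

def Spec_find_waldo (crowd : List String) (out : List Int) : Prop := out = find_waldo_alt crowd
instance (crowd : List String) (out : List Int) : Decidable (Spec_find_waldo crowd out) := by unfold Spec_find_waldo; infer_instance

-- ===== CLAIM (what is proved, stated in full; the proofs are below) =====
def Claim_equal_find_waldo : Prop := ∀ (crowd : List String), Dom_find_waldo crowd → Pre_find_waldo crowd → Spec_find_waldo crowd (find_waldo crowd)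

-- ===== LEMMAS AND PROOFS =====

-- the grid as a flat list of cells ((row, col), char) in reading order
def cellsRow (x : Int) (row : List Char) : List ((Int × Int) × Char) :=
  (PySem.List.enumerate row 0).map (fun yc => ((x, yc.1), yc.2))

def cellsOf (rows : List String) (x : Int) : List ((Int × Int) × Char) :=
  match rows with
  | [] => []
  | s :: rest => cellsRow x s.toList ++ cellsOf rest (x + 1)

-- B's dict-building step, on a single cell
def stepB (d : PySem.Dict Char ((Int × Int) × Int)) (e : (Int × Int) × Char) :
    PySem.Dict Char ((Int × Int) × Int) :=
  match d.get? e.2 with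
  | some pc => d.insert e.2 (pc.1, pc.2 + 1)
  | none => d.insert e.2 (e.1, (1 : Int))

-- first position of char c in the cell list
def fpos (L : List ((Int × Int) × Char)) (c : Char) : Int × Int :=
  ((L.find? (fun e => e.2 == c)).map (·.1)).getD (0, 0)

def lexlt (p q : Int × Int) : Prop := p.1 < q.1 ∨ (p.1 = q.1 ∧ p.2 < q.2)

theorem chars_cellsOf (rows : List String) (x : Int) :
    (cellsOf rows x).map (·.2) = (rows.map String.toList).flatten := by
  induction rows generalizing x with
  | nil => simp [cellsOf]
  | cons s rest ih =>
    simp only [cellsOf, List.map_append, ih, List.map_cons, List.flatten_cons]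
    congr 1
    simp only [cellsRow, List.map_map, Function.comp_def]
    exact PySem.List.map_snd_enumerate _ 0

theorem findA_inner_eq (list1 : List Char) (row : List Char) (x y : Int) :
    findA_inner list1 row x y =
      ((PySem.List.enumerate row y).find? (fun yc => list1.count yc.2 == 1)).map
        (fun yc => [x, yc.1]) := by
  induction row generalizing y with
  | nil => simp [findA_inner, PySem.List.enumerate_nil]
  | cons c rest ih =>
    rw [findA_inner, PySem.List.enumerate_cons, List.find?_cons]
    by_cases h : list1.count c = 1
    · simp [h]
    · have hc : (list1.count c == 1) = false := by simp [h]
      rw [hc, ih]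
      simp [h]

theorem findA_outer_eq (list1 : List Char) (rows : List String) (x : Int) :
    findA_outer list1 rows x =
      ((cellsOf rows x).find? (fun e => list1.count e.2 == 1)).map (fun e => [e.1.1, e.1.2]) := by
  induction rows generalizing x with
  | nil => simp [findA_outer, cellsOf]
  | cons s rest ih =>
    rw [findA_outer, findA_inner_eq, cellsOf, List.find?_append]
    rw [show (cellsRow x s.toList).find? (fun e => list1.count e.2 == 1)
        = ((PySem.List.enumerate s.toList 0).find? (fun yc => list1.count yc.2 == 1)).map
            (fun yc => ((x, yc.1), yc.2)) by
      rw [cellsRow, List.find?_map]; rfl]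
    cases h : (PySem.List.enumerate s.toList 0).find? (fun yc => list1.count yc.2 == 1) with
    | some yc => simp
    | none => simp [ih]

theorem buildB_eq (crowd : List String) (x : Int) (d : PySem.Dict Char ((Int × Int) × Int)) :
    (PySem.List.enumerate crowd x).foldl
      (fun d xr => (PySem.List.enumerate xr.2.toList 0).foldl
        (fun d yc =>
          match d.get? yc.2 with
          | some pc => d.insert yc.2 (pc.1, pc.2 + 1)
          | none => d.insert yc.2 ((xr.1, yc.1), (1 : Int))) d) d
    = (cellsOf crowd x).foldl stepB d := by
  induction crowd generalizing x d with
  | nil => simp [cellsOf, PySem.List.enumerate_nil]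
  | cons s rest ih =>
    rw [PySem.List.enumerate_cons, List.foldl_cons, cellsOf, List.foldl_append, ih]
    congr 1
    rw [cellsRow, List.foldl_map]
    rfl

theorem ofList_append_singleton (m : List Char) (c : Char) :
    PySem.Set.ofList (m ++ [c]) = if c ∈ m then PySem.Set.ofList m else PySem.Set.ofList m ++ [c] := by
  rw [PySem.Set.ofList_eq_foldl, List.foldl_append, ← PySem.Set.ofList_eq_foldl]
  simp [PySem.Set.add, PySem.Set.contains, PySem.Set.mem_ofList]

theorem fpos_append_of_mem (L : List ((Int × Int) × Char)) (e : (Int × Int) × Char) (c : Char)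
    (h : c ∈ L.map (·.2)) : fpos (L ++ [e]) c = fpos L c := by
  obtain ⟨cell, hcell, hc⟩ := List.mem_map.1 h
  have : (L.find? (fun e => e.2 == c)).isSome := by
    rw [List.find?_isSome]; exact ⟨cell, hcell, by simp [hc]⟩
  obtain ⟨v, hv⟩ := Option.isSome_iff_exists.1 this
  simp [fpos, List.find?_append, hv]

theorem fpos_append_of_not_mem (L : List ((Int × Int) × Char)) (e : (Int × Int) × Char)
    (h : e.2 ∉ L.map (·.2)) : fpos (L ++ [e]) e.2 = e.1 := by
  have hn : L.find? (fun x => x.2 == e.2) = none := by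
    rw [List.find?_eq_none]; intro x hx hb
    exact h (List.mem_map.2 ⟨x, hx, by simpa using hb⟩)
  simp [fpos, List.find?_append, hn]

theorem items_buildB (L : List ((Int × Int) × Char)) :
    (L.foldl stepB PySem.Dict.empty).items =
      (PySem.List.dedup (L.map (·.2))).map
        (fun c => (c, (fpos L c, ((L.map (·.2)).count c : Int)))) := by
  induction L using List.reverseRecOn with
  | nil => simp [PySem.Dict.empty, PySem.List.dedup, PySem.Set.ofList]
  | append_singleton L e ih =>
    rw [List.foldl_append, List.foldl_cons, List.foldl_nil]
    set D := L.foldl stepB PySem.Dict.empty with hD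
    have hkeys : D.keys = PySem.List.dedup (L.map (·.2)) := by
      show D.items.map (·.1) = _
      rw [ih, List.map_map]; simp [Function.comp_def]
    have hnodup : D.keys.Nodup := by
      rw [hkeys]; exact PySem.Set.nodup_ofList _
    by_cases hc : e.2 ∈ L.map (·.2)
    · -- seen before: overwrite with incremented count
      have hmem : (e.2, (fpos L e.2, ((L.map (·.2)).count e.2 : Int))) ∈ D.items := by
        rw [ih]
        exact List.mem_map.2 ⟨e.2, by rw [PySem.List.dedup] at *; exact (PySem.Set.mem_ofList _ _).2 hc, rfl⟩
      have hget : D.get? e.2 = some (fpos L e.2, ((L.map (·.2)).count e.2 : Int)) :=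
        PySem.Dict.get?_of_mem_items D hmem hnodup
      have hcont : D.contains e.2 = true := by
        rw [PySem.Dict.contains_eq_decide_mem_keys, hkeys]
        simp [PySem.List.dedup, PySem.Set.mem_ofList, hc]
      rw [stepB, hget]
      rw [PySem.Dict.items_insert_of_contains D _ hcont, ih]
      have hded : PySem.List.dedup ((L ++ [e]).map (·.2)) = PySem.List.dedup (L.map (·.2)) := by
        rw [List.map_append, List.map_singleton, PySem.List.dedup, PySem.List.dedup,
          ofList_append_singleton, if_pos hc]
      rw [hded, List.map_map]
      apply List.map_congr_left
      intro c' hc'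
      have hc'm : c' ∈ L.map (·.2) := by
        rw [PySem.List.dedup] at hc'; exact (PySem.Set.mem_ofList _ _).1 hc'
      by_cases hee : c' = e.2
      · subst hee
        simp only [Function.comp_apply, beq_self_eq_true, if_true]
        rw [fpos_append_of_mem L e _ hc]
        simp [List.count_append]
      · have hbe : (c' == e.2) = false := by simp [hee]
        simp only [Function.comp_apply, hbe]
        have hne : ¬ e.2 = c' := fun h => by simp [h] at hbe
        rw [fpos_append_of_mem L e c' hc'm]
        simp [List.count_append, hne]
    · -- fresh char: append
      have hget : D.get? e.2 = none := by
        rw [PySem.Dict.get?_eq_none_iff_not_mem_keys, hkeys]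
        simp [PySem.List.dedup, PySem.Set.mem_ofList, hc]
      have hcont : D.contains e.2 = false := by
        rw [PySem.Dict.contains_eq_decide_mem_keys, hkeys]
        simp [PySem.List.dedup, PySem.Set.mem_ofList, hc]
      rw [stepB, hget]
      rw [PySem.Dict.items_insert_of_not_contains D _ hcont, ih]
      have hded : PySem.List.dedup ((L ++ [e]).map (·.2))
          = PySem.List.dedup (L.map (·.2)) ++ [e.2] := by
        rw [List.map_append, List.map_singleton, PySem.List.dedup, PySem.List.dedup,
          ofList_append_singleton, if_neg hc]
      rw [hded, List.map_append]
      congr 1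
      · apply List.map_congr_left
        intro c' hc'
        have hc'm : c' ∈ L.map (·.2) := by
          rw [PySem.List.dedup] at hc'; exact (PySem.Set.mem_ofList _ _).1 hc'
        have hee : c' ≠ e.2 := fun h => hc (h ▸ hc'm)
        have hbe : (c' == e.2) = false := by simp [hee]
        have hne : ¬ e.2 = c' := fun h => by simp [h] at hbe
        rw [fpos_append_of_mem L e c' hc'm]
        simp [List.count_append, hne]
      · simp only [List.map_singleton]
        rw [fpos_append_of_not_mem L e hc]
        simp [List.count_append, List.count_eq_zero_of_not_mem hc]

theorem dedup_filter_fpos (q : Char → Bool) (L : List ((Int × Int) × Char))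
    (hq : ∀ c, q c = true → (L.map (·.2)).count c ≤ 1) :
    ((PySem.List.dedup (L.map (·.2))).filter q).map (fpos L)
      = (L.filter (fun e => q e.2)).map (·.1) := by
  induction L using List.reverseRecOn with
  | nil => simp [PySem.List.dedup, PySem.Set.ofList]
  | append_singleton L e ih =>
    have hqL : ∀ c, q c = true → (L.map (·.2)).count c ≤ 1 := by
      intro c hqc
      have := hq c hqc
      have hle : (L.map (·.2)).count c ≤ ((L ++ [e]).map (·.2)).count c := by
        simp [List.count_append]
      omega
    by_cases hc : e.2 ∈ L.map (·.2)
    · have hded : PySem.List.dedup ((L ++ [e]).map (·.2)) = PySem.List.dedup (L.map (·.2)) := by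
        rw [List.map_append, List.map_singleton, PySem.List.dedup, PySem.List.dedup,
          ofList_append_singleton, if_pos hc]
      have hqe : q e.2 = false := by
        by_contra h
        have hqe : q e.2 = true := by revert h; cases q e.2 <;> simp
        have h1 : 1 ≤ (L.map (·.2)).count e.2 := List.one_le_count_iff.2 hc
        have := hq e.2 hqe
        simp [List.count_append] at this
        omega
      rw [hded, List.filter_append, List.filter_singleton]
      simp only [hqe, Bool.cond_false, List.append_nil]
      rw [← ih hqL]
      apply List.map_congr_left
      intro c' hc'
      have hc'm : c' ∈ L.map (·.2) :=
        (PySem.Set.mem_ofList _ _).1 (List.mem_of_mem_filter hc')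
      exact fpos_append_of_mem L e c' hc'm
    · have hded : PySem.List.dedup ((L ++ [e]).map (·.2))
          = PySem.List.dedup (L.map (·.2)) ++ [e.2] := by
        rw [List.map_append, List.map_singleton, PySem.List.dedup, PySem.List.dedup,
          ofList_append_singleton, if_neg hc]
      rw [hded, List.filter_append, List.map_append, List.filter_append, List.map_append]
      congr 1
      · rw [← ih hqL]
        apply List.map_congr_left
        intro c' hc'
        have hc'm : c' ∈ L.map (·.2) :=
          (PySem.Set.mem_ofList _ _).1 (List.mem_of_mem_filter hc')
        exact fpos_append_of_mem L e c' hc'm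
      · rw [List.filter_singleton, List.filter_singleton]
        cases hqe : q e.2 with
        | false => simp
        | true => simp [fpos_append_of_not_mem L e hc]

theorem fst_mem_cellsRow (x : Int) (row : List Char) (e : (Int × Int) × Char)
    (h : e ∈ cellsRow x row) : e.1.1 = x := by
  obtain ⟨yc, _, rfl⟩ := List.mem_map.1 h
  rfl

theorem fst_mem_cellsOf (rows : List String) (x : Int) (e : (Int × Int) × Char)
    (h : e ∈ cellsOf rows x) : x ≤ e.1.1 := by
  induction rows generalizing x with
  | nil => simp [cellsOf] at h
  | cons s rest ih =>
    rw [cellsOf, List.mem_append] at h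
    rcases h with h | h
    · exact le_of_eq (fst_mem_cellsRow x s.toList e h).symm
    · have := ih (x + 1) h
      omega

theorem pairwise_cellsRow (x : Int) (row : List Char) :
    (cellsRow x row).Pairwise (fun a b => lexlt a.1 b.1) := by
  have := PySem.List.pairwise_lt_enumerate row 0
  refine (List.pairwise_map.2 ?_)
  exact this.imp (fun h => Or.inr ⟨rfl, h⟩)

theorem pairwise_cellsOf (rows : List String) (x : Int) :
    (cellsOf rows x).Pairwise (fun a b => lexlt a.1 b.1) := by
  induction rows generalizing x with
  | nil => simp [cellsOf]
  | cons s rest ih =>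
    rw [cellsOf, List.pairwise_append]
    refine ⟨pairwise_cellsRow x s.toList, ih (x + 1), ?_⟩
    intro a ha b hb
    have h1 := fst_mem_cellsRow x s.toList a ha
    have h2 := fst_mem_cellsOf rest (x + 1) b hb
    exact Or.inl (by omega)

theorem min2?_cons_min (t : List (Int × Int)) : ∀ m, (∀ y ∈ t, lexlt m y) →
    PySem.List.min2? (m :: t) (fun p => p.1) (fun p => p.2) = some m := by
  induction t with
  | nil => intro m h; rfl
  | cons y t ih =>
    intro m h
    have hy := h y List.mem_cons_self
    have hcond : (decide (y.1 < m.1) || !decide (m.1 < y.1) && decide (y.2 < m.2)) = false := by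
      rcases hy with h1 | ⟨h1, h2⟩ <;> simp <;> omega
    have ihm := ih m (fun z hz => h z (List.mem_cons_of_mem _ hz))
    simp only [PySem.List.min2?, List.foldl_cons] at ihm ⊢
    simp only [hcond] at ⊢
    simpa using ihm

theorem min2?_sorted (l : List (Int × Int)) (h : l.Pairwise lexlt) :
    PySem.List.min2? l (fun p => p.1) (fun p => p.2) = l.head? := by
  cases l with
  | nil => rfl
  | cons m t =>
    rw [List.pairwise_cons] at h
    rw [min2?_cons_min t m h.1]
    rfl

theorem head?_filter {α : Type} (p : α → Bool) (l : List α) :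
    (l.filter p).head? = l.find? p := by
  induction l with
  | nil => rfl
  | cons a t ih =>
    rw [List.filter_cons, List.find?_cons]
    cases hp : p a
    · simp [ih]
    · simp

-- the empty-separator join is concatenation
theorem chars_join_nil (ls : List (List Char)) : PySem.Chars.join [] ls = ls.flatten := by
  induction ls with
  | nil => simp [PySem.Chars.join_nil]
  | cons p rest ih =>
    cases rest with
    | nil => simp [PySem.Chars.join_singleton]
    | cons q rr =>
      rw [PySem.Chars.join_cons_cons, ih]
      simp

theorem natcast_beq_one (n : Nat) : (((n : Int)) == 1) = (n == 1) := by
  have h : ((n : Int) = 1) ↔ (n = 1) := by omega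
  cases hn : n == 1
  · simp only [beq_eq_false_iff_ne] at hn ⊢
    exact fun hh => hn (h.1 hh)
  · simp only [beq_iff_eq] at hn ⊢
    exact h.2 hn

-- ===== VERDICT (by name: the statement is the Claim_ definition above) =====
theorem find_waldo_spec : Claim_equal_find_waldo := by
  intro crowd _ _
  unfold Spec_find_waldo
  have hlist1 : (PySem.Str.join "" crowd).toList.foldl (fun acc ch => acc ++ [ch]) ([] : List Char)
      = (cellsOf crowd 0).map (·.2) := by
    rw [PySem.List.foldl_append_singleton_eq_self, List.nil_append,
      PySem.Str.toList_join, show ("" : String).toList = [] from rfl, chars_join_nil,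
      chars_cellsOf]
  simp only [find_waldo, find_waldo_alt]
  rw [hlist1, findA_outer_eq, buildB_eq]
  rw [show (List.foldl stepB PySem.Dict.empty (cellsOf crowd 0)).values
      = (List.foldl stepB PySem.Dict.empty (cellsOf crowd 0)).items.map (·.2) from rfl,
    items_buildB, List.map_map, List.filter_map, List.map_map]
  simp only [Function.comp_def]
  rw [show (fun x : Char => ((List.count x (List.map (fun x => x.2) (cellsOf crowd 0)) : Int) == 1))
      = (fun x : Char => (List.count x (List.map (fun x => x.2) (cellsOf crowd 0)) == 1)) from
    funext (fun x => natcast_beq_one _)]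
  rw [show (fun x : Char => fpos (cellsOf crowd 0) x) = fpos (cellsOf crowd 0) from rfl]
  rw [dedup_filter_fpos _ _ (fun c hc => by simp only [beq_iff_eq] at hc; omega)]
  have hsorted : ((List.filter (fun e => (List.count e.2 (List.map (fun x => x.2) (cellsOf crowd 0)) == 1))
      (cellsOf crowd 0)).map (·.1)).Pairwise lexlt := by
    rw [List.pairwise_map]
    exact (pairwise_cellsOf crowd 0).filter _
  rw [min2?_sorted _ hsorted, List.head?_map, head?_filter]
  cases (cellsOf crowd 0).find?
      (fun e => (List.count e.2 (List.map (fun x => x.2) (cellsOf crowd 0)) == 1)) with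
  | none => rfl
  | some e => rfl
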